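-- pv_equiv track=rewrite | github.com/jyker/tagclass | tagclass/associate.py | get_subrule
-- ===== SOURCE A (Python) =====
-- from itertools import combinations
-- from typing import Iterator, Set, NewType, Dict, List
--
-- Init = 'INIT'
--
-- def get_subrule(items: List[str]) -> List[str]:
--     num = len(items)
--     if num < 1:
--         raise ValueError('[x] items must be at least 2 elements')
--     if num == 1:
--         return [Init]
--     if num == 2:
--         return [i for i in items]
--     sub_items = combinations(sorted(items), num - 1)
--     return [';'.join(i) for i in sub_items]
-- ===== SOURCE B (Python) =====
-- from itertools import accumulate
--
--
-- def get_subrule(items):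
--     num = len(items)
--     if num < 1:
--         raise ValueError('[x] items must be at least 2 elements')
--     if num == 1:
--         return ['INIT']
--     if num == 2:
--         return list(items)
--     s = sorted(items)
--     # prefix joins: pref[j] = ';'.join(s[:j+1]); suffix joins: suf[j] = ';'.join(s[num-1-j:])
--     pref = list(accumulate(s, lambda a, b: a + ';' + b))
--     suf = list(accumulate(reversed(s), lambda a, b: b + ';' + a))
--     return ([pref[num - 2]]
--             + [pref[i - 1] + ';' + suf[num - 2 - i] for i in reversed(range(1, num - 1))]
--             + [suf[num - 2]])
-- ===== Notes on version B (the rewrite author's own statement) =====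
-- stated objective: alternative
-- what changed: Instead of generating each (n-1)-combination and joining it, B makes two itertools.accumulate passes computing running prefix joins and suffix joins of the sorted list, then forms each leave-one-out string by a single pref[i-1]+';'+suf[num-2-i] concatenation.
import Mathlib
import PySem

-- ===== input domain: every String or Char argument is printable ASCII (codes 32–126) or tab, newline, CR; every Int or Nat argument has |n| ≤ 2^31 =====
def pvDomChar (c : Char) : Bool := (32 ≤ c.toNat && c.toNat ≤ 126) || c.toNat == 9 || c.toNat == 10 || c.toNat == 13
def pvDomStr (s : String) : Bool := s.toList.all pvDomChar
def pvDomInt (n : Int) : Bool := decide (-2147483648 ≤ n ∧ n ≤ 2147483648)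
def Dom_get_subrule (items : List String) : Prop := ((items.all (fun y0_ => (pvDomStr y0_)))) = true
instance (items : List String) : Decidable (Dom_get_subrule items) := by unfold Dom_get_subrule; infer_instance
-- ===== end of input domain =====

-- B replaces the per-subset itertools.combinations + join of A by two accumulate passes
-- (prefix joins and suffix joins) and assembles each leave-one-out string by one
-- concatenation pref[i-1] + ';' + suf[num-2-i] — objective: alternative algorithm.

-- ===== PORT A =====
-- itertools.combinations(l, k) in lexicographic order, step-for-step recursive transcription
def pyCombinations (k : Nat) (l : List String) : List (List String) :=
  match k, l with
  | 0, _ => [[]]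
  | _ + 1, [] => []
  | k + 1, x :: xs => (pyCombinations k xs).map (x :: ·) ++ pyCombinations (k + 1) xs

def get_subrule (items : List String) : List String :=
  let num := items.length
  if num < 1 then []       -- Python raises ValueError here; excluded by Pre_get_subrule
  else if num == 1 then ["INIT"]
  else if num == 2 then items.map (fun i => i)
  else
    let sub_items := pyCombinations (num - 1) (PySem.List.sorted items (fun x => x) false)
    sub_items.map (fun i => PySem.Str.join ";" i)

-- ===== PORT B =====
-- itertools.accumulate(l, f): running folds [l0, f l0 l1, f (f l0 l1) l2, …]
def pyAccumulateGo (f : String → String → String) (a : String) : List String → List String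
  | [] => [a]
  | y :: ys => a :: pyAccumulateGo f (f a y) ys

def pyAccumulate (f : String → String → String) : List String → List String
  | [] => []
  | x :: xs => pyAccumulateGo f x xs

def get_subrule_alt (items : List String) : List String :=
  let num := items.length
  if num < 1 then []       -- Python raises ValueError here; excluded by Pre_get_subrule
  else if num == 1 then ["INIT"]
  else if num == 2 then items
  else
    let s := PySem.List.sorted items (fun x => x) false
    let pref := pyAccumulate (fun a b => a ++ ";" ++ b) s
    let suf := pyAccumulate (fun a b => b ++ ";" ++ a) s.reverse
    -- reversed(range(1, num-1)) ported by hand as (List.range' 1 (num-2)).reverse (exact: num ≥ 3 here)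
    [pref.getD (num - 2) ""]
      ++ (List.range' 1 (num - 2)).reverse.map
          (fun i => pref.getD (i - 1) "" ++ ";" ++ suf.getD (num - 2 - i) "")
      ++ [suf.getD (num - 2) ""]

-- ===== PRECONDITION & SPEC =====
-- Pre_ excludes only the empty list, on which Python A raises ValueError.
def Pre_get_subrule (items : List String) : Prop := items ≠ []
instance (items : List String) : Decidable (Pre_get_subrule items) := by unfold Pre_get_subrule; infer_instance
def pvWitness_get_subrule : List String := ["b", "a", "c"]

def Spec_get_subrule (items : List String) (out : List String) : Prop := out = get_subrule_alt items
instance (items : List String) (out : List String) : Decidable (Spec_get_subrule items out) := by unfold Spec_get_subrule; infer_instance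

-- ===== CLAIM (what is proved, stated in full; the proofs are below) =====
def Claim_equal_get_subrule : Prop := ∀ (items : List String), Dom_get_subrule items → Pre_get_subrule items → Spec_get_subrule items (get_subrule items)

-- ===== LEMMAS AND PROOFS =====

theorem pyCombinations_gt (l : List String) : ∀ k, l.length < k → pyCombinations k l = [] := by
  induction l with
  | nil => intro k hk; match k, hk with | n + 1, _ => rfl
  | cons x xs ih =>
    intro k hk
    match k, hk with
    | n + 1, hk =>
      simp only [pyCombinations]
      rw [ih n (by simpa using hk), ih (n + 1) (by simp at hk ⊢; omega)]
      rfl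

theorem pyCombinations_full (l : List String) : pyCombinations l.length l = [l] := by
  induction l with
  | nil => rfl
  | cons x xs ih =>
    simp only [List.length_cons, pyCombinations, ih]
    rw [pyCombinations_gt xs (xs.length + 1) (by omega)]
    rfl

-- combinations(s, |s|-1) is the leave-one-out list, omitting the last index first
theorem pyCombinations_pred (t : List String) : ∀ x : String,
    pyCombinations t.length (x :: t)
      = (List.range (t.length + 1)).reverse.map
          (fun i => (x :: t).take i ++ (x :: t).drop (i + 1)) := by
  induction t with
  | nil => intro x; rfl
  | cons y ys ih =>
    intro x
    simp only [List.length_cons]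
    rw [show pyCombinations (ys.length + 1) (x :: y :: ys)
        = (pyCombinations ys.length (y :: ys)).map (x :: ·) ++ pyCombinations (ys.length + 1) (y :: ys)
        from rfl]
    have hfull := pyCombinations_full (y :: ys)
    simp only [List.length_cons] at hfull
    rw [hfull]
    have hrange : List.range (ys.length + 1 + 1)
        = 0 :: (List.range (ys.length + 1)).map Nat.succ := List.range_succ_eq_map
    rw [hrange]
    simp only [List.reverse_cons, List.map_reverse, List.map_append, List.map_map, List.map_cons,
      List.map_nil]
    rw [← List.map_reverse]
    have hfun : ((fun i => (x :: y :: ys).take i ++ (x :: y :: ys).drop (i + 1)) ∘ Nat.succ)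
        = (fun i => x :: ((y :: ys).take i ++ (y :: ys).drop (i + 1))) := by
      funext i
      simp [Nat.succ_eq_add_one, List.take_succ_cons, List.drop_succ_cons]
    rw [hfun, ih y]
    simp [List.map_reverse, Function.comp]

-- join lemmas at String level, via the Chars bridge
theorem sjoin_singleton (p : String) : PySem.Str.join ";" [p] = p := by
  rw [← String.toList_inj]
  simp [PySem.Str.toList_join, PySem.Chars.join_singleton]

theorem sjoin_cons_cons (p q : String) (t : List String) :
    PySem.Str.join ";" (p :: q :: t) = p ++ ";" ++ PySem.Str.join ";" (q :: t) := by
  rw [← String.toList_inj]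
  simp [PySem.Str.toList_join, PySem.Chars.join_cons_cons]

theorem sjoin_append (a b : List String) (ha : a ≠ []) (hb : b ≠ []) :
    PySem.Str.join ";" (a ++ b)
      = PySem.Str.join ";" a ++ ";" ++ PySem.Str.join ";" b := by
  induction a with
  | nil => exact absurd rfl ha
  | cons x a' ih =>
    cases a' with
    | nil =>
      cases b with
      | nil => exact absurd rfl hb
      | cons c u => rw [List.singleton_append, sjoin_cons_cons, sjoin_singleton]
    | cons x' a'' =>
      have h := ih (by simp)
      rw [List.cons_append] at h
      rw [List.cons_append, List.cons_append, sjoin_cons_cons, h, sjoin_cons_cons]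
      simp [String.append_assoc]

theorem join_cons_merge (a b : String) (t : List String) :
    PySem.Str.join ";" ((a ++ ";" ++ b) :: t) = a ++ ";" ++ PySem.Str.join ";" (b :: t) := by
  cases t with
  | nil => rw [sjoin_singleton, sjoin_singleton]
  | cons c u =>
    rw [sjoin_cons_cons, sjoin_cons_cons]
    simp [String.append_assoc]

theorem join_snoc_merge (y a : String) (m : List String) :
    PySem.Str.join ";" (m ++ [y ++ ";" ++ a]) = PySem.Str.join ";" (m ++ [y, a]) := by
  cases m with
  | nil =>
    rw [List.nil_append, List.nil_append, sjoin_singleton, sjoin_cons_cons, sjoin_singleton]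
  | cons x m' =>
    rw [sjoin_append (x :: m') _ (by simp) (by simp), sjoin_append (x :: m') [y, a] (by simp) (by simp),
      sjoin_singleton, sjoin_cons_cons, sjoin_singleton, String.append_assoc, String.append_assoc]

theorem foldl_joinF : ∀ (t : List String) (a : String),
    t.foldl (fun u v => u ++ ";" ++ v) a = PySem.Str.join ";" (a :: t)
  | [], a => (sjoin_singleton a).symm
  | y :: ys, a => by
    rw [List.foldl_cons, foldl_joinF ys (a ++ ";" ++ y), join_cons_merge, sjoin_cons_cons]

theorem foldl_joinG : ∀ (t : List String) (a : String),
    t.foldl (fun u v => v ++ ";" ++ u) a = PySem.Str.join ";" (t.reverse ++ [a])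
  | [], a => by simp [sjoin_singleton]
  | y :: ys, a => by
    rw [List.foldl_cons, foldl_joinG ys (y ++ ";" ++ a), join_snoc_merge, List.reverse_cons,
      List.append_assoc]
    rfl

-- accumulate characterisation
theorem pyAccumulateGo_eq (f : String → String → String) :
    ∀ (l : List String) (a : String),
      pyAccumulateGo f a l = (List.range (l.length + 1)).map (fun j => (l.take j).foldl f a) := by
  intro l
  induction l with
  | nil => intro a; simp [pyAccumulateGo, List.range_succ]
  | cons y ys ih =>
    intro a
    rw [show pyAccumulateGo f a (y :: ys) = a :: pyAccumulateGo f (f a y) ys from rfl, ih]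
    rw [show List.range ((y :: ys).length + 1)
        = 0 :: (List.range (ys.length + 1)).map Nat.succ from List.range_succ_eq_map,
      List.map_cons, List.map_map]
    congr 1
    all_goals
      refine List.map_congr_left (fun j _ => ?_)
      simp [Function.comp, List.take_succ_cons]

theorem getD_map_range (h : Nat → String) (n j : Nat) (hj : j < n) :
    (((List.range n).map h).getD j "") = h j := by
  simp [List.getD, hj]

theorem pref_getD (x : String) (l : List String) (j : Nat) (hj : j ≤ l.length) :
    (pyAccumulate (fun a b => a ++ ";" ++ b) (x :: l)).getD j ""
      = PySem.Str.join ";" ((x :: l).take (j + 1)) := by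
  rw [show pyAccumulate (fun a b => a ++ ";" ++ b) (x :: l)
      = pyAccumulateGo (fun a b => a ++ ";" ++ b) x l from rfl,
    pyAccumulateGo_eq, getD_map_range _ _ _ (by omega), foldl_joinF]
  congr 1
  all_goals simp [List.take_succ_cons]

theorem suf_getD (s : List String) (r : String) (rest : List String) (hrev : s.reverse = r :: rest)
    (j : Nat) (hj : j ≤ rest.length) :
    (pyAccumulate (fun a b => b ++ ";" ++ a) s.reverse).getD j ""
      = PySem.Str.join ";" (s.drop (s.length - 1 - j)) := by
  rw [hrev, show pyAccumulate (fun a b => b ++ ";" ++ a) (r :: rest)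
      = pyAccumulateGo (fun a b => b ++ ";" ++ a) r rest from rfl,
    pyAccumulateGo_eq, getD_map_range _ _ _ (by omega), foldl_joinG]
  congr 1
  have hs : s = rest.reverse ++ [r] := by
    rw [← List.reverse_reverse s, hrev, List.reverse_cons]
  have hlen : s.length = rest.length + 1 := by rw [hs]; simp
  rw [List.reverse_take]
  rw [show s.length - 1 - j = rest.length - j from by omega]
  rw [show s.drop (rest.length - j) = (rest.reverse ++ [r]).drop (rest.length - j) from by rw [← hs]]
  rw [List.drop_append_of_le_length (by simp <;> omega)]

-- A's main branch in leave-one-out form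
theorem A_branch (x : String) (t : List String) :
    (pyCombinations ((x :: t).length - 1) (x :: t)).map (fun i => PySem.Str.join ";" i)
      = (List.range (x :: t).length).reverse.map
          (fun i => PySem.Str.join ";" ((x :: t).take i ++ (x :: t).drop (i + 1))) := by
  rw [show (x :: t).length - 1 = t.length from by simp, pyCombinations_pred t x]
  simp [List.map_reverse, List.map_map, Function.comp]

-- ===== VERDICT (by name: the statement is the Claim_ definition above) =====
theorem get_subrule_spec : Claim_equal_get_subrule := by
  intro items _ hpre
  unfold Spec_get_subrule get_subrule get_subrule_alt
  by_cases h1 : items.length < 1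
  · exact absurd (List.eq_nil_of_length_eq_zero (by omega)) hpre
  · simp only [if_neg h1]
    by_cases h2 : items.length = 1
    · simp [h2]
    · by_cases h3 : items.length = 2
      · simp [h3, List.map_id']
      · have hne : (items.length == 1) = false := by simp [h2]
        have hne2 : (items.length == 2) = false := by simp [h3]
        simp only [hne, hne2, Bool.false_eq_true, if_false]
        set s := PySem.List.sorted items (fun x => x) false with hs
        have hlen : s.length = items.length := PySem.List.length_sorted _ _ _
        obtain ⟨m, hm⟩ : ∃ m, items.length = m + 3 := ⟨items.length - 3, by omega⟩
        obtain ⟨x, t, hxt⟩ : ∃ x t, s = x :: t := by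
          cases hsc : s with
          | nil => exfalso; rw [hsc] at hlen; simp at hlen; omega
          | cons a b => exact ⟨a, b, rfl⟩
        have htlen : t.length = m + 2 := by
          rw [hxt] at hlen; simp at hlen; omega
        obtain ⟨r, rest, hrev⟩ : ∃ r rest, s.reverse = r :: rest := by
          cases hsc : s.reverse with
          | nil =>
            exfalso
            have : s = [] := by simpa using congrArg List.reverse hsc
            rw [this] at hlen; simp at hlen; omega
          | cons a b => exact ⟨a, b, rfl⟩
        have hrestlen : rest.length = m + 2 := by
          have := congrArg List.length hrev
          simp [hlen, hm] at this
          omega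
        have hslen : s.length = m + 3 := by omega
        -- A side to leave-one-out form
        rw [show items.length - 1 = s.length - 1 from by omega, hxt, A_branch x t, ← hxt]
        -- decompose the reversed range
        have hrange : List.range s.length = (0 :: List.range' 1 (m + 1)) ++ [m + 2] := by
          rw [hslen, List.range_eq_range', show m + 3 = (m + 2) + 1 from rfl, List.range'_concat,
            show m + 2 = (m + 1) + 1 from rfl, List.range'_succ]
          simp
        rw [hrange]
        simp only [List.reverse_append, List.reverse_cons, List.reverse_nil, List.nil_append,
          List.map_append, List.map_cons, List.map_nil, List.singleton_append, List.cons_append]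
        -- now componentwise
        have hm2 : items.length - 2 = m + 1 := by omega
        rw [hm2]
        congr 1
        · -- head: omit the last index
          rw [show s.drop (m + 2 + 1) = [] from List.drop_eq_nil_of_le (by omega), List.append_nil]
          rw [hxt, pref_getD x t (m + 1) (by omega), show m + 1 + 1 = m + 2 from rfl, ← hxt]
        · congr 1
          · -- middle
            apply List.map_congr_left
            intro i hi
            rw [List.mem_reverse, List.mem_range'_1] at hi
            obtain ⟨hi1, hi2⟩ := hi
            have htake : s.take i ≠ [] := by
              have : (s.take i).length = i := by rw [List.length_take]; omega
              intro hcon; rw [hcon] at this; simp at this; omega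
            have hdrop : s.drop (i + 1) ≠ [] := by
              have : (s.drop (i + 1)).length = s.length - (i + 1) := List.length_drop ..
              intro hcon; rw [hcon] at this; simp at this; omega
            rw [sjoin_append _ _ htake hdrop]
            rw [hxt, pref_getD x t (i - 1) (by omega), show i - 1 + 1 = i from by omega, ← hxt]
            rw [suf_getD s r rest hrev (m + 1 - i) (by omega)]
            rw [show s.length - 1 - (m + 1 - i) = i + 1 from by omega]
          · -- last: omit index 0
            rw [List.take_zero, List.nil_append]
            rw [suf_getD s r rest hrev (m + 1) (by omega)]
            rw [show s.length - 1 - (m + 1) = 0 + 1 from by omega]
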